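-- pv_equiv track=rewrite | github.com/woong-1458099/gwa-lak-tal-chul-number-one | 안푼문제/배틀싸피.py | can_fire
-- ===== SOURCE A (Python) =====
-- def can_fire(r, c, target, dirs, max_range=3):
--     """
--     현재 위치 (r,c)에서 target을 사거리 max_range 이내로
--     직선 방향으로 쏠 수 있는지 확인
--     """
--     for d, (dr, dc) in enumerate(dirs):
--         nr, nc = r, c
--         for dist in range(1, max_range + 1):
--             nr += dr
--             nc += dc
--             if (nr, nc) == target:
--                 return True, d
--     return False, -1
-- ===== SOURCE B (Python) =====
-- def can_fire(r, c, target, dirs, max_range=3):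
--     """Arithmetic re-implementation: for each direction decide by division
--     whether one integer dist in 1..max_range lands exactly on target."""
--     ddr = target[0] - r
--     ddc = target[1] - c
--     for d, (dr, dc) in enumerate(dirs):
--         if dr == 0 and dc == 0:
--             ok = ddr == 0 and ddc == 0 and max_range >= 1
--         elif dr != 0:
--             q = ddr // dr
--             ok = ddr % dr == 0 and 1 <= q <= max_range and dc * q == ddc
--         else:
--             q = ddc // dc
--             ok = ddr == 0 and ddc % dc == 0 and 1 <= q <= max_range
--         if ok:
--             return True, d
--     return False, -1
-- ===== Notes on version B (the rewrite author's own statement) =====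
-- stated objective: faster
-- what changed: Replaced the inner stepping loop over dist=1..max_range by closed-form divisibility arithmetic deciding in O(1) per direction whether some dist lands on the target.
import Mathlib
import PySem

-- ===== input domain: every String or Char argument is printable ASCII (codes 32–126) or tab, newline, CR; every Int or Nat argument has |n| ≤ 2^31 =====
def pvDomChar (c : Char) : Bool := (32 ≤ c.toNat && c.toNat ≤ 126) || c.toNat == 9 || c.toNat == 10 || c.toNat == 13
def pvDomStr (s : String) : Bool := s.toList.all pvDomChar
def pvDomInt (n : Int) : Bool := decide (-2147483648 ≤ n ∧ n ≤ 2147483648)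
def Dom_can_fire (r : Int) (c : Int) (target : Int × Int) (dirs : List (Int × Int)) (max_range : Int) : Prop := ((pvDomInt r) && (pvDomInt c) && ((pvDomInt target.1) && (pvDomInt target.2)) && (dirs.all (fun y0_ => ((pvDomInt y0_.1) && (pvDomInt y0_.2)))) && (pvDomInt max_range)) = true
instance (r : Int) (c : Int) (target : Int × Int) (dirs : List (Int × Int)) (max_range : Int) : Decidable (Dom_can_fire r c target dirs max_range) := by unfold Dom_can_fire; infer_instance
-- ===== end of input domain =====

-- B replaces A's inner stepping loop by per-direction divisibility arithmetic (measured asymptotically faster in max_range).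


-- ===== PORT A =====
-- inner loop: 'for dist in range(1, max_range+1): nr += dr; nc += dc; if (nr,nc)==target: return True'
def pvInnerA (target : Int × Int) (dr dc : Int) : List Int → Int × Int → Bool
  | [], _ => false
  | _ :: rest, (nr, nc) =>
    let nr' := nr + dr
    let nc' := nc + dc
    if (nr', nc') = target then true else pvInnerA target dr dc rest (nr', nc')

-- outer loop: 'for d, (dr, dc) in enumerate(dirs): ...'
def pvOuterA (r c : Int) (target : Int × Int) (max_range : Int) : List (Int × (Int × Int)) → Bool × Int
  | [] => (false, -1)
  | (d, (dr, dc)) :: rest =>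
    if pvInnerA target dr dc (PySem.List.pyRange 1 (max_range + 1) 1) (r, c) then (true, d)
    else pvOuterA r c target max_range rest

def can_fire (r : Int) (c : Int) (target : Int × Int) (dirs : List (Int × Int)) (max_range : Int) : Bool × Int :=
  pvOuterA r c target max_range (PySem.List.enumerate dirs 0)

-- ===== PORT B =====
-- B's per-direction arithmetic test
def pvHitB (ddr ddc max_range dr dc : Int) : Bool :=
  if dr == 0 && dc == 0 then
    ddr == 0 && ddc == 0 && decide (1 ≤ max_range)
  else if dr != 0 then
    let q := PySem.Int.floordiv ddr dr
    PySem.Int.mod ddr dr == 0 && decide (1 ≤ q) && decide (q ≤ max_range) && dc * q == ddc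
  else
    let q := PySem.Int.floordiv ddc dc
    ddr == 0 && PySem.Int.mod ddc dc == 0 && decide (1 ≤ q) && decide (q ≤ max_range)

def pvOuterB (ddr ddc max_range : Int) : List (Int × (Int × Int)) → Bool × Int
  | [] => (false, -1)
  | (d, (dr, dc)) :: rest =>
    if pvHitB ddr ddc max_range dr dc then (true, d)
    else pvOuterB ddr ddc max_range rest

def can_fire_alt (r : Int) (c : Int) (target : Int × Int) (dirs : List (Int × Int)) (max_range : Int) : Bool × Int :=
  pvOuterB (target.1 - r) (target.2 - c) max_range (PySem.List.enumerate dirs 0)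

-- ===== PRECONDITION & SPEC =====
def Spec_can_fire (r : Int) (c : Int) (target : Int × Int) (dirs : List (Int × Int)) (max_range : Int) (out : Bool × Int) : Prop := out = can_fire_alt r c target dirs max_range
instance (r : Int) (c : Int) (target : Int × Int) (dirs : List (Int × Int)) (max_range : Int) (out : Bool × Int) : Decidable (Spec_can_fire r c target dirs max_range out) := by unfold Spec_can_fire; infer_instance

-- ===== CLAIM (what is proved, stated in full; the proofs are below) =====
def Claim_equal_can_fire : Prop := ∀ (r : Int) (c : Int) (target : Int × Int) (dirs : List (Int × Int)) (max_range : Int), Dom_can_fire r c target dirs max_range → Spec_can_fire r c target dirs max_range (can_fire r c target dirs max_range)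

-- ===== LEMMAS AND PROOFS =====

-- A's inner loop hits iff some step count 1..l.length lands on target
theorem pvInnerA_iff (target : Int × Int) (dr dc : Int) (l : List Int) (nr nc : Int) :
    pvInnerA target dr dc l (nr, nc) = true ↔
      ∃ j : Nat, 1 ≤ j ∧ j ≤ l.length ∧ nr + dr * j = target.1 ∧ nc + dc * j = target.2 := by
  induction l generalizing nr nc with
  | nil => simp [pvInnerA]
  | cons x rest ih =>
    simp only [pvInnerA]
    by_cases h : (nr + dr, nc + dc) = target
    · simp only [h]
      constructor
      · intro _
        exact ⟨1, le_refl 1, by simp, by rw [← h]; push_cast; ring_nf,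
          by rw [← h]; push_cast; ring_nf⟩
      · intro _; rfl
    · rw [if_neg h, ih]
      constructor
      · rintro ⟨j, h1, h2, h3, h4⟩
        exact ⟨j + 1, by omega, by simp; omega, by push_cast; linarith,
          by push_cast; linarith⟩
      · rintro ⟨j, h1, h2, h3, h4⟩
        match j, h1 with
        | 1, _ =>
          exfalso; apply h
          have : ((1:Nat) : Int) = 1 := rfl
          rw [this, mul_one] at h3 h4
          cases target; simp at h3 h4 ⊢; exact ⟨h3, h4⟩
        | (k+2), _ =>
          refine ⟨k + 1, by omega, by simp at h2 ⊢; omega, ?_, ?_⟩ <;>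
            · push_cast at h3 h4 ⊢; linarith

-- B's arithmetic test decides the same existential
theorem pvHitB_iff (ddr ddc m dr dc : Int) :
    pvHitB ddr ddc m dr dc = true ↔
      ∃ j : Nat, 1 ≤ j ∧ (j : Int) ≤ m ∧ dr * j = ddr ∧ dc * j = ddc := by
  unfold pvHitB
  by_cases hdr : dr = 0
  · by_cases hdc : dc = 0
    · subst hdr; subst hdc
      simp only [beq_self_eq_true, Bool.and_self, if_true, Bool.and_eq_true, beq_iff_eq,
        decide_eq_true_eq]
      constructor
      · rintro ⟨⟨h1, h2⟩, h3⟩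
        exact ⟨1, le_refl 1, by exact_mod_cast h3, by simpa using h1.symm, by simpa using h2.symm⟩
      · rintro ⟨j, h1, h2, h3, h4⟩
        have hj1 : (1 : Int) ≤ (j : Int) := by exact_mod_cast h1
        exact ⟨⟨by simpa using h3.symm, by simpa using h4.symm⟩, by linarith⟩
    · subst hdr
      simp [hdc]
      constructor
      · rintro ⟨⟨⟨h0, hm⟩, h1⟩, h2⟩
        have hdvd : dc ∣ ddc := (PySem.Int.mod_eq_zero_iff_dvd ddc dc).mp hm
        obtain ⟨k, hk⟩ := hdvd
        have hq : PySem.Int.floordiv ddc dc = k := by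
          have h5 := PySem.Int.floordiv_mul_add_mod ddc dc
          rw [hm, add_zero] at h5
          have h6 : PySem.Int.floordiv ddc dc * dc = dc * k := by rw [h5, hk]
          exact mul_left_cancel₀ hdc (by linarith)
        rw [hq] at h1 h2
        refine ⟨k.toNat, by omega, by omega, by simp [h0], ?_⟩
        rw [Int.toNat_of_nonneg (by omega)]; exact hk.symm
      · rintro ⟨j, h1, h2, h3, h4⟩
        have hj1 : (1 : Int) ≤ (j : Int) := by exact_mod_cast h1
        have hm : PySem.Int.mod ddc dc = 0 := (PySem.Int.mod_eq_zero_iff_dvd ddc dc).mpr ⟨j, h4.symm⟩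
        have hq : PySem.Int.floordiv ddc dc = (j : Int) := by
          have h5 := PySem.Int.floordiv_mul_add_mod ddc dc
          rw [hm, add_zero] at h5
          have h6 : PySem.Int.floordiv ddc dc * dc = dc * (j : Int) := by rw [h5, ← h4]
          exact mul_left_cancel₀ hdc (by linarith)
        exact ⟨⟨⟨by simpa using h3.symm, hm⟩, by rw [hq]; exact hj1⟩, by rw [hq]; exact h2⟩
  · simp [hdr]
    constructor
    · rintro ⟨⟨⟨hm, h1⟩, h2⟩, h3⟩
      have hdvd : dr ∣ ddr := (PySem.Int.mod_eq_zero_iff_dvd ddr dr).mp hm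
      obtain ⟨k, hk⟩ := hdvd
      have hq : PySem.Int.floordiv ddr dr = k := by
        have h5 := PySem.Int.floordiv_mul_add_mod ddr dr
        rw [hm, add_zero] at h5
        have h6 : PySem.Int.floordiv ddr dr * dr = dr * k := by rw [h5, hk]
        exact mul_left_cancel₀ hdr (by linarith)
      rw [hq] at h1 h2 h3
      refine ⟨k.toNat, by omega, by omega, ?_, ?_⟩
      · rw [Int.toNat_of_nonneg (by omega)]; exact hk.symm
      · rw [Int.toNat_of_nonneg (by omega)]; linarith
    · rintro ⟨j, h1, h2, h3, h4⟩
      have hj1 : (1 : Int) ≤ (j : Int) := by exact_mod_cast h1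
      have hm : PySem.Int.mod ddr dr = 0 := (PySem.Int.mod_eq_zero_iff_dvd ddr dr).mpr ⟨j, h3.symm⟩
      have hq : PySem.Int.floordiv ddr dr = (j : Int) := by
        have h5 := PySem.Int.floordiv_mul_add_mod ddr dr
        rw [hm, add_zero] at h5
        have h6 : PySem.Int.floordiv ddr dr * dr = dr * (j : Int) := by rw [h5, ← h3]
        exact mul_left_cancel₀ hdr (by linarith)
      exact ⟨⟨⟨hm, by rw [hq]; exact hj1⟩, by rw [hq]; exact h2⟩, by rw [hq]; linarith⟩

-- per direction: A's inner loop equals B's arithmetic test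
theorem inner_eq_hit (r c : Int) (target : Int × Int) (m dr dc : Int) :
    pvInnerA target dr dc (PySem.List.pyRange 1 (m + 1) 1) (r, c)
      = pvHitB (target.1 - r) (target.2 - c) m dr dc := by
  rw [Bool.eq_iff_iff, pvInnerA_iff, pvHitB_iff]
  have hlen : (PySem.List.pyRange 1 (m + 1) 1).length = (m + 1 - 1).toNat :=
    PySem.List.length_pyRange_one 1 (m + 1)
  constructor
  · rintro ⟨j, h1, h2, h3, h4⟩
    rw [hlen] at h2
    exact ⟨j, h1, by omega, by linarith, by linarith⟩
  · rintro ⟨j, h1, h2, h3, h4⟩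
    refine ⟨j, h1, by rw [hlen]; omega, by linarith, by linarith⟩

theorem outer_eq (r c : Int) (target : Int × Int) (m : Int) (dirs : List (Int × Int)) (s : Int) :
    pvOuterA r c target m (PySem.List.enumerate dirs s)
      = pvOuterB (target.1 - r) (target.2 - c) m (PySem.List.enumerate dirs s) := by
  induction dirs generalizing s with
  | nil => simp [PySem.List.enumerate_nil, pvOuterA, pvOuterB]
  | cons x rest ih =>
    obtain ⟨dr, dc⟩ := x
    rw [PySem.List.enumerate_cons]
    simp only [pvOuterA, pvOuterB, inner_eq_hit]
    split_ifs <;> simp [ih]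

-- ===== VERDICT (by name: the statement is the Claim_ definition above) =====
theorem can_fire_spec : Claim_equal_can_fire := by
  intro r c target dirs max_range _
  unfold Spec_can_fire can_fire can_fire_alt
  exact outer_eq r c target max_range dirs 0
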